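-- pv_equiv track=rewrite | github.com/leekh7411/Apta-MCTS | src/mcts.py | act8_aptamer_to_string
-- ===== SOURCE A (Python) =====
-- def act8_aptamer_to_string(best_aptamer):
--     reordered_aptamer = ""
--     for apt in best_aptamer:
--         if apt in "acgu":
--             reordered_aptamer = reordered_aptamer + apt
--         elif apt in "ACGU":
--             reordered_aptamer = apt + reordered_aptamer
--         else:
--             continue
--     return reordered_aptamer.upper()
-- ===== SOURCE B (Python) =====
-- def act8_aptamer_to_string(best_aptamer):
--     uppers = [c for c in best_aptamer if c in "ACGU"]
--     lowers = [c for c in best_aptamer if c in "acgu"]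
--     return ("".join(reversed(uppers)) + "".join(lowers)).upper()
-- ===== Notes on version B (the rewrite author's own statement) =====
-- stated objective: simpler
-- what changed: Replaces the single interleaved pass that prepends uppercase and appends lowercase to one accumulator by two filtering comprehensions (uppercase kept, lowercase kept) plus one explicit reversal of the uppercase group before concatenation and a final .upper().
import Mathlib
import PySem

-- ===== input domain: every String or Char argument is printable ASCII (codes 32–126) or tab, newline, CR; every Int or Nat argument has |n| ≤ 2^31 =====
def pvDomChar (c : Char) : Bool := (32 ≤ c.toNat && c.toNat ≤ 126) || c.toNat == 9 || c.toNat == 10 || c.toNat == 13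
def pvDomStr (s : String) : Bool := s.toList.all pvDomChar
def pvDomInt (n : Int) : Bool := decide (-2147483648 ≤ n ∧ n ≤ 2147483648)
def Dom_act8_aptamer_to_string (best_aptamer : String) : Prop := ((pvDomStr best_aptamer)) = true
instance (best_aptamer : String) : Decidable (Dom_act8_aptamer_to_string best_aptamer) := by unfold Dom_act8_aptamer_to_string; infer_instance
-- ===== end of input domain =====

-- B replaces A's single interleaved prepend/append accumulation by two filtering
-- passes (uppercase group, lowercase group) plus one explicit reversal: simpler decomposition.


-- ===== PORT A =====
-- loop body: lowercase 'acgu' appended, uppercase 'ACGU' prepended, others skipped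
def act8_loopStep (acc : List Char) (apt : Char) : List Char :=
  if List.contains "acgu".toList apt then acc ++ [apt]
  else if List.contains "ACGU".toList apt then apt :: acc
  else acc

def act8_aptamer_to_string (best_aptamer : String) : String :=
  let reordered_aptamer := best_aptamer.toList.foldl act8_loopStep []
  PySem.Str.upper (String.ofList reordered_aptamer)

-- ===== PORT B =====
def act8_aptamer_to_string_alt (best_aptamer : String) : String :=
  let uppers := best_aptamer.toList.filter (fun c => List.contains "ACGU".toList c)
  let lowers := best_aptamer.toList.filter (fun c => List.contains "acgu".toList c)
  PySem.Str.upper (String.ofList (uppers.reverse ++ lowers))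

-- ===== PRECONDITION & SPEC =====
def Spec_act8_aptamer_to_string (best_aptamer : String) (out : String) : Prop := out = act8_aptamer_to_string_alt best_aptamer
instance (best_aptamer : String) (out : String) : Decidable (Spec_act8_aptamer_to_string best_aptamer out) := by unfold Spec_act8_aptamer_to_string; infer_instance

-- ===== CLAIM (what is proved, stated in full; the proofs are below) =====
def Claim_equal_act8_aptamer_to_string : Prop := ∀ (best_aptamer : String), Dom_act8_aptamer_to_string best_aptamer → Spec_act8_aptamer_to_string best_aptamer (act8_aptamer_to_string best_aptamer)

-- ===== LEMMAS AND PROOFS =====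
theorem act8_loop_invariant (l : List Char) : ∀ (acc : List Char),
    l.foldl act8_loopStep acc =
      (l.filter (fun c => List.contains "ACGU".toList c)).reverse ++ acc ++
        l.filter (fun c => List.contains "acgu".toList c) := by
  induction l with
  | nil => intro acc; simp
  | cons c l ih =>
    intro acc
    by_cases hl : c = 'a' ∨ c = 'c' ∨ c = 'g' ∨ c = 'u'
    · rcases hl with rfl | rfl | rfl | rfl <;> simp [act8_loopStep, ih]
    · by_cases hu : c = 'A' ∨ c = 'C' ∨ c = 'G' ∨ c = 'U'
      · rcases hu with rfl | rfl | rfl | rfl <;> simp [act8_loopStep, ih]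
      · push Not at hl hu
        simp [act8_loopStep, hl.1, hl.2.1, hl.2.2.1, hl.2.2.2,
          hu.1, hu.2.1, hu.2.2.1, hu.2.2.2, ih]

-- ===== VERDICT (by name: the statement is the Claim_ definition above) =====
theorem act8_aptamer_to_string_spec : Claim_equal_act8_aptamer_to_string := by
  intro s _
  show _ = _
  simp only [act8_aptamer_to_string, act8_aptamer_to_string_alt, act8_loop_invariant,
    List.append_nil]
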